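-- pv_equiv track=rewrite | github.com/Erfan-Hosseini/Python-World | Assignment 11/Carpet.py | generate_rug
-- ===== SOURCE A (Python) =====
-- def generate_rug(n):
--     if n % 2 == 0:
--         return "The number of rows must be odd!"
--
--     rug = []
--     center = n // 2
--     for i in range(n):
--         row = []
--         for j in range(n):
--             distance = max(abs(i - center), abs(j - center))
--             row.append(distance)
--         rug.append(row)
--
--     return rug
-- ===== SOURCE B (Python) =====
-- def generate_rug(n):
--     if n % 2 == 0:
--         return "The number of rows must be odd!"
--     c = n // 2
--     rug = []
--     for i in range(n):
--         d = abs(i - c)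
--         side = list(range(c, d, -1))
--         rug.append(side + [d] * (n - 2 * len(side)) + side[::-1])
--     return rug
-- ===== Notes on version B (the rewrite author's own statement) =====
-- stated objective: alternative
-- what changed: B builds each row as three runs (descending side from range(c,d,-1), a constant middle block [d]*(2d+1), and the mirrored side) instead of computing max(abs(i-c),abs(j-c)) cell by cell in a nested loop.
import Mathlib
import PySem

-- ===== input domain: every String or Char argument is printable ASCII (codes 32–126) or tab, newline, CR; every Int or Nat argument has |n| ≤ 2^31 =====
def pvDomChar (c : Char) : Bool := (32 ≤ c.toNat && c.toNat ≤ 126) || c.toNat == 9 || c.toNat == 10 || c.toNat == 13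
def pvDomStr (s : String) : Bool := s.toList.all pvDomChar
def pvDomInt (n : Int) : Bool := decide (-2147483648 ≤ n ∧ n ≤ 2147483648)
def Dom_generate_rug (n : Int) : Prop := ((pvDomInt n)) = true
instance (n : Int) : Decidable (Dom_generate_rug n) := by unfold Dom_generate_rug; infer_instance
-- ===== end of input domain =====

-- B builds each row as three runs (descending side, constant middle block, mirrored side)
-- instead of computing each cell's Chebyshev distance in a nested loop; equivalence is on odd n.

-- ===== PORT A =====
-- literal port of A's nested loops: for even n the Python returns a string (not a list of lists),
-- so those inputs are excluded by Pre_ and the port returns [] there (never relied on).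
def generate_rug (n : Int) : List (List Int) :=
  if PySem.Int.mod n 2 = 0 then []
  else
    -- center = n // 2, inlined
    (PySem.List.pyRange 0 n 1).foldl
      (fun rug i =>
        rug ++ [(PySem.List.pyRange 0 n 1).foldl
          (fun row j => row ++ [max |i - PySem.Int.floordiv n 2| |j - PySem.Int.floordiv n 2|]) []])
      []

-- ===== PORT B =====
-- side[::-1] is ported as List.reverse (a full reversing slice is exactly reverse)
def generate_rug_alt (n : Int) : List (List Int) :=
  if PySem.Int.mod n 2 = 0 then []
  else
    -- c = n // 2, inlined
    (PySem.List.pyRange 0 n 1).foldl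
      (fun rug i =>
        let d := |i - PySem.Int.floordiv n 2|
        let side := PySem.List.pyRange (PySem.Int.floordiv n 2) d (-1)
        rug ++ [side ++ (List.replicate (n - 2 * (side.length : Int)).toNat d ++ side.reverse)])
      []

-- ===== PRECONDITION & SPEC =====
-- Pre_ excludes even n, on which the Python A returns the string
-- "The number of rows must be odd!" instead of a list of lists (a value outside the declared type).
def Pre_generate_rug (n : Int) : Prop := PySem.Int.mod n 2 = 1
instance (n : Int) : Decidable (Pre_generate_rug n) := by unfold Pre_generate_rug; infer_instance
def pvWitness_generate_rug : Int := (5)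
def Spec_generate_rug (n : Int) (out : List (List Int)) : Prop := out = generate_rug_alt n
instance (n : Int) (out : List (List Int)) : Decidable (Spec_generate_rug n out) := by unfold Spec_generate_rug; infer_instance

-- ===== CLAIM (what is proved, stated in full; the proofs are below) =====
def Claim_equal_generate_rug : Prop := ∀ (n : Int), Dom_generate_rug n → Pre_generate_rug n → Spec_generate_rug n (generate_rug n)

-- ===== LEMMAS AND PROOFS =====

-- the common closed form: the grid of size 2t+1 whose (i,j) entry is the Chebyshev distance to the center t
def chebGrid (t : Nat) : List (List Int) :=
  (List.range (2 * t + 1)).map (fun i : Nat =>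
    (List.range (2 * t + 1)).map (fun j : Nat => max |(i : Int) - t| |(j : Int) - t|))

theorem foldl_push {α β : Type} (f : α → β) :
    ∀ (l : List α) (init : List β),
      l.foldl (fun acc x => acc ++ [f x]) init = init ++ l.map f := by
  intro l
  induction l with
  | nil => simp
  | cons x xs ih => intro init; simp [List.foldl, ih]

-- A's double loop equals chebGrid, written over List.range n.toNat
-- A's double loop equals chebGrid, written over List.range n.toNat
theorem gridA_eq (n : Int) (c : Int) :
    (PySem.List.pyRange 0 n 1).foldl
      (fun rug i =>
        rug ++ [(PySem.List.pyRange 0 n 1).foldl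
          (fun row j => row ++ [max |i - c| |j - c|]) []])
      []
    = (List.range n.toNat).map (fun i : Nat =>
        (List.range n.toNat).map (fun j : Nat => max |(i : Int) - c| |(j : Int) - c|)) := by
  rw [foldl_push, PySem.List.pyRange_one]
  simp only [Int.sub_zero, zero_add, List.nil_append, List.map_map]
  apply List.map_congr_left
  intro i _
  simp only [Function.comp_apply]
  rw [foldl_push]
  simp only [List.nil_append, List.map_map]
  rfl

-- B's row for index i equals the row of Chebyshev distances
theorem rowB_eq (m i : Nat) (hi : i < 2 * m + 1) :
    PySem.List.pyRange (m : Int) |(i : Int) - (m : Int)| (-1)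
      ++ (List.replicate ((2 * (m : Int) + 1) - 2 * (((PySem.List.pyRange (m : Int) |(i : Int) - (m : Int)| (-1)).length : Int))).toNat |(i : Int) - (m : Int)|
      ++ (PySem.List.pyRange (m : Int) |(i : Int) - (m : Int)| (-1)).reverse)
    = (List.range (2 * m + 1)).map (fun j : Nat => max |(i : Int) - (m : Int)| |(j : Int) - (m : Int)|) := by
  obtain ⟨dn, hdn, hd⟩ : ∃ dn : Nat, dn ≤ m ∧ |(i : Int) - (m : Int)| = (dn : Int) := by
    rcases le_total i m with h | h
    · exact ⟨m - i, by omega, by rw [abs_sub_comm, abs_of_nonneg (by omega)]; omega⟩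
    · exact ⟨i - m, by omega, by rw [abs_of_nonneg (by omega)]; omega⟩
  rw [hd]
  have hrev : (PySem.List.pyRange (m : Int) (dn : Int) (-1)).reverse
      = PySem.List.pyRange ((dn : Int) + 1) ((m : Int) + 1) 1 := by
    rw [PySem.List.pyRange_neg_one_eq_reverse, List.reverse_reverse]
  rw [hrev, PySem.List.pyRange_neg_one, PySem.List.pyRange_one]
  rw [show ((m : Int) - (dn : Int)).toNat = m - dn by omega]
  rw [show ((m : Int) + 1 - ((dn : Int) + 1)).toNat = m - dn by omega]
  simp only [List.length_map, List.length_range]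
  rw [show ((2 * (m : Int) + 1) - 2 * (((m - dn : Nat) : Int))).toNat = 2 * dn + 1 by omega]
  rw [show 2 * m + 1 = (m - dn) + ((2 * dn + 1) + (m - dn)) by omega]
  rw [List.range_add, List.range_add]
  simp only [List.map_append, List.map_map]
  congr 1
  · -- descending side
    apply List.map_congr_left
    intro k hk
    rw [List.mem_range] at hk
    have habs : |(k : Int) - (m : Int)| = (m : Int) - (k : Int) := by
      rw [abs_sub_comm, abs_of_nonneg (by omega)]
    rw [habs, max_eq_right (by omega)]
  congr 1
  · -- constant middle block
    symm
    rw [List.eq_replicate_iff]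
    refine ⟨by simp, ?_⟩
    intro b hb
    simp only [List.mem_map, List.mem_range, Function.comp_apply] at hb
    obtain ⟨k, hk, rfl⟩ := hb
    have habs : |(((m - dn + k : Nat)) : Int) - (m : Int)| ≤ (dn : Int) := by
      rcases abs_cases ((((m - dn + k : Nat)) : Int) - (m : Int)) with ⟨h1, h2⟩ | ⟨h1, h2⟩ <;>
        rw [h1] <;> omega
    exact max_eq_left habs
  · -- mirrored ascending side
    apply List.map_congr_left
    intro k hk
    rw [List.mem_range] at hk
    have habs : |(((m - dn + (2 * dn + 1 + k) : Nat)) : Int) - (m : Int)|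
        = (dn : Int) + 1 + (k : Int) := by
      rw [abs_of_nonneg (by omega)]
      omega
    simp only [Function.comp_apply]
    rw [habs, max_eq_right (by omega)]

-- B's loop equals chebGrid, for n = 2m+1
theorem gridB_eq (m : Nat) :
    (PySem.List.pyRange 0 (2 * (m : Int) + 1) 1).foldl
      (fun rug i =>
        let d := |i - PySem.Int.floordiv (2 * (m : Int) + 1) 2|
        let side := PySem.List.pyRange (PySem.Int.floordiv (2 * (m : Int) + 1) 2) d (-1)
        rug ++ [side ++ (List.replicate ((2 * (m : Int) + 1) - 2 * (side.length : Int)).toNat d ++ side.reverse)])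
      []
    = chebGrid m := by
  have hfd : PySem.Int.floordiv (2 * (m : Int) + 1) 2 = (m : Int) := by
    rw [PySem.Int.floordiv_eq_ediv_of_pos (by norm_num)]
    omega
  simp only [hfd]
  rw [foldl_push, PySem.List.pyRange_one]
  simp only [Int.sub_zero, zero_add, List.nil_append, List.map_map]
  unfold chebGrid
  rw [show (2 * (m : Int) + 1).toNat = 2 * m + 1 by omega]
  apply List.map_congr_left
  intro i hi
  rw [List.mem_range] at hi
  simp only [Function.comp_apply]
  exact rowB_eq m i hi

-- ===== VERDICT (by name: the statement is the Claim_ definition above) =====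
theorem generate_rug_spec : Claim_equal_generate_rug := by
  intro n _ hpre
  unfold Spec_generate_rug generate_rug generate_rug_alt
  unfold Pre_generate_rug at hpre
  rw [hpre]
  rw [if_neg (by norm_num), if_neg (by norm_num)]
  by_cases hneg : n < 0
  · rw [gridA_eq]
    have h0 : n.toNat = 0 := by omega
    rw [h0, PySem.List.pyRange_one_eq_nil (by omega)]
    simp
  · have hmod : n % 2 = 1 := by
      have h2 := PySem.Int.mod_eq_emod_of_pos (a := n) (b := 2) (by omega)
      omega
    obtain ⟨m, rfl⟩ : ∃ m : Nat, n = 2 * (m : Int) + 1 :=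
      ⟨((n - 1) / 2).toNat, by omega⟩
    have hfd : PySem.Int.floordiv (2 * (m : Int) + 1) 2 = (m : Int) := by
      rw [PySem.Int.floordiv_eq_ediv_of_pos (by norm_num)]
      omega
    rw [gridA_eq, gridB_eq]
    rw [hfd]
    unfold chebGrid
    rw [show (2 * (m : Int) + 1).toNat = 2 * m + 1 by omega]
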